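-- pv_equiv track=rewrite | github.com/hanasuru/CTFdScraper | test/Codepwnda/Rev/sissyrev/chall.py | putar
-- ===== SOURCE A (Python) =====
-- def tukar(blok):
--     blokyangtertukar = ""
--     penukar = [10, 13, 0, 8, 11, 7, 6, 12, 15, 14, 3, 4, 2, 1, 5, 9]
--     for dijit in blok:
--         dijitbaru = penukar[int(dijit, 16)]
--         blokyangtertukar += hex(dijitbaru)[2:]
--     return blokyangtertukar
--
-- def hexpad(blok):
--     kosong = 8 - len(blok)
--     return kosong * "0" + blok
--
-- def mutasi(blok):
--     pemutasi = [20, 10, 26, 23, 11, 21, 15, 25, 0, 9, 6, 2, 17, 30, 29, 12, 18, 16, 28, 14, 5, 7, 1, 22, 19, 8, 27, 13, 3, 31, 24, 4]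
--     blok = int(blok, 16)
--     dimutasi = 0
--     for i in range(32):
--         bit = (blok & (1 << i)) >> i
--         dimutasi |= bit << pemutasi[i]
--     return hexpad(hex(dimutasi)[2:])
--
-- def putar(pesan):
--     nomerblok = len(pesan)//8
--     pesanyangditukar = ""
--     for i in range(nomerblok):
--         pesanyangditukar += tukar(pesan[8*i:8*i+8])
--     pesanyangdimutasi = ""
--     for i in range(nomerblok):
--         pesanyangdimutasi += mutasi(pesanyangditukar[8*i:8*i+8])
--     return pesanyangdimutasi
-- ===== SOURCE B (Python) =====
-- def putar(pesan):
--     penukar = [10, 13, 0, 8, 11, 7, 6, 12, 15, 14, 3, 4, 2, 1, 5, 9]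
--     pemutasi = [20, 10, 26, 23, 11, 21, 15, 25, 0, 9, 6, 2, 17, 30, 29, 12,
--                 18, 16, 28, 14, 5, 7, 1, 22, 19, 8, 27, 13, 3, 31, 24, 4]
--     hexdigits = "0123456789abcdef"
--     out = []
--     for i in range(len(pesan) // 8):
--         # read the block's 8 nibbles, substitute each through penukar,
--         # and accumulate the 32-bit value directly (no intermediate hex string)
--         val = 0
--         for c in pesan[8*i:8*i+8]:
--             val = val * 16 + penukar[int(c, 16)]
--         # bit permutation on the integer
--         perm = 0
--         for j in range(32):
--             if (val >> j) & 1: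
--                 perm |= 1 << pemutasi[j]
--         # fixed-width lowercase hex, 8 digits
--         out.append(''.join(hexdigits[(perm >> 4*(7-k)) & 15] for k in range(8)))
--     return ''.join(out)
-- ===== Notes on version B (the rewrite author's own statement) =====
-- stated objective: simpler
-- what changed: B replaces A's two message-wide passes (build a substituted hex string, then re-slice and re-parse it per block) with a single per-block pipeline that accumulates each block's 32-bit value directly from its nibbles, permutes the bits of that integer, and emits fixed-width hex by nibble extraction instead of hexpad over a minimal hex string.
import Mathlib
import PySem

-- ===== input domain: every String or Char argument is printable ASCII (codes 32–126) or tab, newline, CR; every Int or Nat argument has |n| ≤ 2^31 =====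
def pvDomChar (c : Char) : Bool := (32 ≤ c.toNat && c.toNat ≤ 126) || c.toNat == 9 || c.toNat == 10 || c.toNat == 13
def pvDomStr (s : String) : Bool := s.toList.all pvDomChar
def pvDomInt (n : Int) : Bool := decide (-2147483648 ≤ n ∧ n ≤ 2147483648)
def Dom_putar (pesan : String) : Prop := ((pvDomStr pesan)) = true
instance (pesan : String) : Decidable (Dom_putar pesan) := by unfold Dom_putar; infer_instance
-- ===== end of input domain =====

-- B re-implements putar as one fused per-block pipeline (nibble→int, permute, format),
-- dropping A's message-wide intermediate substituted string; objective: simpler.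

-- shared data (copied verbatim from both Pythons)
def pvHexChars : List Char := "0123456789abcdef".toList

def pvPenukar : List Nat := [10, 13, 0, 8, 11, 7, 6, 12, 15, 14, 3, 4, 2, 1, 5, 9]

def pvPemutasi : List Nat := [20, 10, 26, 23, 11, 21, 15, 25, 0, 9, 6, 2, 17, 30, 29, 12,
                              18, 16, 28, 14, 5, 7, 1, 22, 19, 8, 27, 13, 3, 31, 24, 4]

-- int(c, 16): exact on hex digits (0-9, a-f, A-F); on any other char Python raises
-- ValueError, which Pre_putar excludes (the returned 16 there is junk, never claimed).
def pvHexVal (c : Char) : Nat := pvHexChars.findIdx (fun d => d = c.toLower)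

-- hex(v)[2:] for a single digit v < 16
def pvHexChar (v : Nat) : Char := pvHexChars.getD v '0'

-- ===== PORT A =====
def tukarA (blok : List Char) : List Char :=
  blok.foldl (fun acc c => acc ++ [pvHexChar (pvPenukar.getD (pvHexVal c) 0)]) []

def hexpadA (blok : List Char) : List Char :=
  List.replicate (8 - blok.length) '0' ++ blok

-- hex(n)[2:] : minimal lowercase hex digits of n ("0" for 0)
def pvHexStr (n : Nat) : List Char :=
  if n < 16 then [pvHexChar n] else pvHexStr (n / 16) ++ [pvHexChar (n % 16)]
termination_by n
decreasing_by exact Nat.div_lt_self (by omega) (by omega)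

-- int(blok, 16) ported as the positional fold: exact here, since mutasi is only ever
-- applied to tukar's output, a string of lowercase hex digits.
def mutasiA (blok : List Char) : List Char :=
  let b := blok.foldl (fun acc c => acc * 16 + pvHexVal c) 0
  let d := (List.range 32).foldl
    (fun acc i => acc ||| (((b &&& (1 <<< i)) >>> i) <<< pvPemutasi.getD i 0)) 0
  hexpadA (pvHexStr d)

-- range(n) over Nat indices; the nonnegative in-range slice pesan[8*i:8*i+8] is PySem.List.slice;
-- string concatenation is ported as List Char append with one final String.ofList.
def putar (pesan : String) : String :=
  let l := pesan.toList
  let n := l.length / 8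
  let t := (List.range n).foldl
    (fun acc i => acc ++ tukarA (PySem.List.slice l (some ((8*i : Nat) : Int)) (some ((8*i+8 : Nat) : Int)))) []
  let m := (List.range n).foldl
    (fun acc i => acc ++ mutasiA (PySem.List.slice t (some ((8*i : Nat) : Int)) (some ((8*i+8 : Nat) : Int)))) []
  String.ofList m

-- ===== PORT B =====
def blockValB (blok : List Char) : Nat :=
  blok.foldl (fun v c => v * 16 + pvPenukar.getD (pvHexVal c) 0) 0

def blockPermB (v : Nat) : Nat :=
  (List.range 32).foldl
    (fun acc j => if (v >>> j) &&& 1 ≠ 0 then acc ||| (1 <<< pvPemutasi.getD j 0) else acc) 0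

-- ''.join(hexdigits[(perm >> 4*(7-k)) & 15] for k in range(8))
def hex8B (v : Nat) : List Char :=
  (List.range 8).map (fun k => pvHexChars.getD ((v >>> (4*(7-k))) &&& 15) '0')

def putar_alt (pesan : String) : String :=
  let l := pesan.toList
  String.ofList (((List.range (l.length / 8)).map
    (fun i => hex8B (blockPermB (blockValB
      (PySem.List.slice l (some ((8*i : Nat) : Int)) (some ((8*i+8 : Nat) : Int))))))).flatten)

-- ===== PRECONDITION & SPEC =====
-- Pre_ excludes exactly the inputs where Python's int(c,16) raises ValueError: a
-- non-hex character among the first 8*(len//8) characters (trailing chars are dropped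
-- by both programs and may be anything).
def Pre_putar (pesan : String) : Prop :=
  ((pesan.toList.take (8 * (pesan.toList.length / 8))).all (fun c => c.toLower ∈ pvHexChars)) = true
instance (pesan : String) : Decidable (Pre_putar pesan) := by unfold Pre_putar; infer_instance

def pvWitness_putar : String := "0123456789abcdefXY"

def Spec_putar (pesan : String) (out : String) : Prop := out = putar_alt pesan
instance (pesan : String) (out : String) : Decidable (Spec_putar pesan out) := by unfold Spec_putar; infer_instance

-- ===== CLAIM (what is proved, stated in full; the proofs are below) =====
def Claim_equal_putar : Prop := ∀ (pesan : String), Dom_putar pesan → Pre_putar pesan → Spec_putar pesan (putar pesan)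

-- ===== LEMMAS AND PROOFS =====

-- substitution of a single digit
def pvSubA (c : Char) : Char := pvHexChar (pvPenukar.getD (pvHexVal c) 0)

theorem tukarA_eq_map (b : List Char) : tukarA b = b.map pvSubA := by
  show List.foldl (fun acc c => acc ++ [pvSubA c]) [] b = _
  rw [PySem.List.foldl_append_singleton_eq_map pvSubA b []]
  rfl

theorem penukar_getD_lt (j : Nat) : pvPenukar.getD j 0 < 16 := by
  by_cases h : j < 16
  · interval_cases j <;> decide
  · rw [List.getD_eq_default _ _ (by simp [pvPenukar]; omega)]; omega

theorem hexVal_hexChar (m : Nat) (hm : m < 16) : pvHexVal (pvHexChar m) = m := by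
  interval_cases m <;> decide

theorem parse_map_sub (b : List Char) (acc : Nat) :
    (b.map pvSubA).foldl (fun a c => a * 16 + pvHexVal c) acc
      = b.foldl (fun a c => a * 16 + pvPenukar.getD (pvHexVal c) 0) acc := by
  induction b generalizing acc with
  | nil => rfl
  | cons c b ih =>
      simp only [List.map_cons, List.foldl_cons]
      rw [show pvHexVal (pvSubA c) = pvPenukar.getD (pvHexVal c) 0 from
        hexVal_hexChar _ (penukar_getD_lt _)]
      exact ih _

theorem bit_extract (v i : Nat) : (v &&& (1 <<< i)) >>> i = (v >>> i) &&& 1 := by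
  rw [Nat.shiftRight_and_distrib, Nat.shiftLeft_shiftRight]

theorem perm_fold_eq (L : List Nat) (v acc : Nat) :
    L.foldl (fun acc i => acc ||| (((v &&& (1 <<< i)) >>> i) <<< pvPemutasi.getD i 0)) acc
      = L.foldl (fun acc j => if (v >>> j) &&& 1 ≠ 0 then acc ||| (1 <<< pvPemutasi.getD j 0) else acc) acc := by
  induction L generalizing acc with
  | nil => rfl
  | cons i L ih =>
      simp only [List.foldl_cons]
      rw [bit_extract]
      have hb : (v >>> i) &&& 1 = 0 ∨ (v >>> i) &&& 1 = 1 := by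
        rw [Nat.and_one_is_mod]; omega
      rcases hb with hb | hb <;> rw [hb]
      · simp only [Nat.zero_shiftLeft, Nat.or_zero, ne_eq, not_true_eq_false, if_neg,
          not_false_eq_true]
        exact ih _
      · simp only [ne_eq, one_ne_zero, not_false_eq_true, if_pos]
        exact ih _

theorem pemutasi_getD_lt (i : Nat) (h : i < 32) : pvPemutasi.getD i 0 < 32 := by
  interval_cases i <;> decide

theorem perm_bound (v : Nat) (L : List Nat) (acc : Nat) (hacc : acc < 2 ^ 32)
    (hL : ∀ i ∈ L, pvPemutasi.getD i 0 < 32) :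
    L.foldl (fun acc j => if (v >>> j) &&& 1 ≠ 0 then acc ||| (1 <<< pvPemutasi.getD j 0) else acc) acc < 2 ^ 32 := by
  induction L generalizing acc with
  | nil => exact hacc
  | cons i L ih =>
      simp only [List.foldl_cons]
      apply ih
      · split
        · apply Nat.or_lt_two_pow hacc
          rw [Nat.shiftLeft_eq, one_mul]
          exact Nat.pow_lt_pow_right (by omega) (hL i (by simp))
        · exact hacc
      · intro j hj; exact hL j (by simp [hj])

-- fixed-width hex, recursive form (proof-side bridge between A's hexpad∘hexStr and B's hex8B)
def toHexFix : Nat → Nat → List Char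
  | 0, _ => []
  | k + 1, d => toHexFix k (d / 16) ++ [pvHexChar (d % 16)]

theorem toHexFix_zero (k : Nat) : toHexFix k 0 = List.replicate k '0' := by
  induction k with
  | zero => rfl
  | succ k ih => rw [toHexFix, List.replicate_succ', Nat.zero_div, ih]; rfl

theorem pad_hexStr (k : Nat) : ∀ d, 1 ≤ k → d < 16 ^ k →
    List.replicate (k - (pvHexStr d).length) '0' ++ pvHexStr d = toHexFix k d := by
  induction k with
  | zero => omega
  | succ k ih =>
      intro d _ hd
      by_cases hsmall : d < 16
      · rw [pvHexStr, if_pos hsmall]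
        by_cases hk : k = 0
        · subst hk
          simp [toHexFix, Nat.mod_eq_of_lt hsmall]
        · rw [toHexFix, Nat.div_eq_of_lt hsmall, Nat.mod_eq_of_lt hsmall, toHexFix_zero]
          simp
      · rw [pvHexStr, if_neg hsmall]
        have hk : 1 ≤ k := by
          by_contra h
          have : k = 0 := by omega
          subst this
          omega
        have hdk : d / 16 < 16 ^ k := by
          rw [pow_succ] at hd
          exact Nat.div_lt_of_lt_mul (by omega)
        have := ih (d / 16) hk hdk
        rw [toHexFix, ← this]
        simp only [List.length_append, List.length_cons, List.length_nil]
        rw [show k + 1 - ((pvHexStr (d / 16)).length + (0 + 1)) = k - (pvHexStr (d / 16)).length by omega]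
        simp

-- B's 8-nibble extraction equals the recursive fixed-width form
theorem nib_eq_toHexFix (k : Nat) : ∀ d,
    (List.range k).map (fun j => pvHexChars.getD ((d >>> (4 * (k - 1 - j))) &&& 15) '0')
      = toHexFix k d := by
  induction k with
  | zero => intro d; rfl
  | succ k ih =>
      intro d
      rw [List.range_succ, List.map_append]
      have hlast : pvHexChars.getD ((d >>> (4 * (k + 1 - 1 - k))) &&& 15) '0'
          = pvHexChar (d % 16) := by
        simp only [Nat.add_sub_cancel, Nat.sub_self, Nat.mul_zero, Nat.shiftRight_zero]
        rw [show (15 : Nat) = 2 ^ 4 - 1 from rfl, Nat.and_two_pow_sub_one_eq_mod]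
        rfl
      rw [List.map_singleton, hlast, toHexFix, ← ih (d / 16)]
      congr 1
      apply List.map_congr_left
      intro j hj
      rw [List.mem_range] at hj
      have h1 : k + 1 - 1 - j = (k - 1 - j) + 1 := by omega
      rw [h1, Nat.mul_add, Nat.mul_one, Nat.add_comm, Nat.shiftRight_add]
      rw [Nat.shiftRight_eq_div_pow, Nat.shiftRight_eq_div_pow, Nat.shiftRight_eq_div_pow]

theorem hex8B_eq (d : Nat) (hd : d < 2 ^ 32) : hexpadA (pvHexStr d) = hex8B d := by
  unfold hexpadA hex8B
  rw [nib_eq_toHexFix 8 d]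
  exact pad_hexStr 8 d (by omega) (by norm_num at hd ⊢; omega)

-- per-block: A's substitute-then-parse-then-permute-then-pad = B's fused pipeline
theorem block_eq (b : List Char) : mutasiA (tukarA b) = hex8B (blockPermB (blockValB b)) := by
  show hexpadA (pvHexStr ((List.range 32).foldl
      (fun acc i => acc ||| ((((tukarA b).foldl (fun a c => a * 16 + pvHexVal c) 0) &&& (1 <<< i)) >>> i) <<< pvPemutasi.getD i 0) 0))
    = hex8B (blockPermB (blockValB b))
  rw [tukarA_eq_map, parse_map_sub]
  unfold blockValB blockPermB
  rw [perm_fold_eq]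
  apply hex8B_eq
  apply perm_bound
  · norm_num
  · intro i hi
    rw [List.mem_range] at hi
    exact pemutasi_getD_lt i hi

-- slicing a flatten of 8-long pieces
theorem flatten_slice (L : List (List Char)) : ∀ i, (∀ x ∈ L, x.length = 8) → i < L.length →
    (L.flatten.drop (8 * i)).take 8 = L.getD i [] := by
  induction L with
  | nil => intro i _ h; simp at h
  | cons x L ih =>
      intro i hlen hi
      cases i with
      | zero =>
          simp only [Nat.mul_zero, List.drop_zero, List.flatten_cons, List.getD_cons_zero]
          rw [show (8 : Nat) = x.length from (hlen x (by simp)).symm, List.take_left]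
      | succ i =>
          rw [List.flatten_cons, List.drop_append,
            show 8 * (i + 1) - x.length = 8 * i by rw [hlen x (by simp)]; ring_nf; omega,
            List.drop_eq_nil_of_le (by rw [hlen x (by simp)]; omega)]
          simp only [List.nil_append, List.getD_cons_succ]
          exact ih i (fun y hy => hlen y (by simp [hy])) (by simpa using hi)

theorem slice_block (xs : List Char) (i : Nat) :
    PySem.List.slice xs (some ((8*i : Nat) : Int)) (some ((8*i+8 : Nat) : Int))
      = (xs.drop (8*i)).take 8 := by
  rw [PySem.List.slice_natCast xs (8*i) (8*i+8)]
  norm_num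

theorem tukarA_length (b : List Char) : (tukarA b).length = b.length := by
  rw [tukarA_eq_map, List.length_map]

theorem main_eq (pesan : String) : putar pesan = putar_alt pesan := by
  unfold putar putar_alt
  simp only [slice_block]
  set l := pesan.toList with hl
  set n := l.length / 8 with hn
  set f : Nat → List Char := fun i => tukarA ((l.drop (8*i)).take 8) with hf
  set g : Nat → List Char := fun i => hex8B (blockPermB (blockValB ((l.drop (8*i)).take 8))) with hg
  rw [PySem.List.foldl_append_eq_flatMap f (List.range n) []]
  have hlen8 : ∀ x ∈ (List.range n).map f, x.length = 8 := by
    intro x hx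
    rw [List.mem_map] at hx
    obtain ⟨i, hi, rfl⟩ := hx
    rw [List.mem_range] at hi
    rw [hf]
    simp only [tukarA_length, List.length_take, List.length_drop]
    omega
  have hcong := PySem.List.foldl_congr_mem (List.range n)
    (fun acc i => acc ++ mutasiA ((((List.range n).flatMap f).drop (8*i)).take 8))
    (fun acc i => acc ++ g i) ([] : List Char) ?_
  · rw [List.nil_append, hcong,
      PySem.List.foldl_append_eq_flatMap g (List.range n) [], List.nil_append,
      List.flatMap_def]
  · intro acc i hi
    rw [List.mem_range] at hi
    show acc ++ mutasiA (((((List.range n).map f).flatten).drop (8*i)).take 8) = acc ++ g i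
    congr 1
    rw [flatten_slice ((List.range n).map f) i hlen8 (by simpa using hi),
      PySem.List.getD_map_range f n i _ hi, hf, hg]
    exact block_eq _

-- ===== VERDICT (by name: the statement is the Claim_ definition above) =====
theorem putar_spec : Claim_equal_putar := by
  intro pesan _ _
  exact main_eq pesan
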